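-- pv_equiv track=rewrite | github.com/Blue-Kite/algorithm | 프로그래머스/유연근무제.py | solution
-- ===== SOURCE A (Python) =====
-- def convertTime(n): # 반드시 분 단위로 변환
--     h = n // 100
--     m = n % 100
--     return h * 60 + m
--
-- def solution(schedules, timelogs, startday):
--     answer = 0
--     n = len(schedules)
--
--     for i in range(n):
--         s = startday
--         for t in timelogs[i]:
--             if s in [6,7]:
--                 s += 1
--                 if s == 8:
--                     s = 1
--                 continue
--             if convertTime(t) > convertTime(schedules[i])+10:
--                 break
--             else:
--                 s += 1
--         else:
--             answer += 1
--
--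
--     return answer
-- ===== SOURCE B (Python) =====
-- def convertTime(n):
--     h, m = divmod(n, 100)
--     return h * 60 + m
--
-- def solution(schedules, timelogs, startday):
--     pairs = list(zip(schedules, timelogs))
--     longest = max((len(logs) for _, logs in pairs), default=0)
--     # weekday positions depend only on startday: compute them once for all employees
--     weekdays = []
--     day = startday
--     for j in range(longest):
--         if day not in (6, 7):
--             weekdays.append(j)
--         day = 1 if day == 7 else day + 1
--     return sum(1 for sched, logs in pairs
--                if all(convertTime(logs[j]) <= convertTime(sched) + 10
--                       for j in weekdays if j < len(logs)))
-- ===== Notes on version B (the rewrite author's own statement) =====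
-- stated objective: alternative
-- what changed: The per-employee stateful day counter with its for/break/else loop is replaced by computing the weekday log positions once (they depend only on startday) and counting employees via sum over a short-circuiting all() on those shared positions.
import Mathlib
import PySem

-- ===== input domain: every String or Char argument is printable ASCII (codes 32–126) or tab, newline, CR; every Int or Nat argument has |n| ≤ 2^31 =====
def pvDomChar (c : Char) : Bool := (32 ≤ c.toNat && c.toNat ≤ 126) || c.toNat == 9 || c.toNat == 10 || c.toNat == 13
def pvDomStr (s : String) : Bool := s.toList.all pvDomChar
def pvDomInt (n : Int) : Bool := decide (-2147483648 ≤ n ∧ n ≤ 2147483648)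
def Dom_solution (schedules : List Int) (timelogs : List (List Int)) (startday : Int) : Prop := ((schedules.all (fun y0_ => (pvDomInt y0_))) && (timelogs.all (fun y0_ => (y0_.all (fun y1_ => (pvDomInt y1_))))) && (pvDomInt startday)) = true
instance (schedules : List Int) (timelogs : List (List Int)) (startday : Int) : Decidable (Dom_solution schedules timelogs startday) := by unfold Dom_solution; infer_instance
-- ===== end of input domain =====

-- B replaces A's per-employee stateful day counter (for/break/else) by weekday log
-- positions computed once from startday and shared by all employees (objective: alternative).

-- ===== PORT A =====
def convertTime (n : Int) : Int :=
  PySem.Int.floordiv n 100 * 60 + PySem.Int.mod n 100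

-- A's inner `for t in timelogs[i] … else:` loop; returns true iff the loop ends without break
def solInner (sched : Int) (logs : List Int) (s : Int) : Bool :=
  match logs with
  | [] => true
  | t :: rest =>
    if s = 6 ∨ s = 7 then
      solInner sched rest (if s + 1 = 8 then 1 else s + 1)
    else if convertTime t > convertTime sched + 10 then false
    else solInner sched rest (s + 1)

def solution (schedules : List Int) (timelogs : List (List Int)) (startday : Int) : Int :=
  (PySem.List.pyRange 0 (schedules.length : Int) 1).foldl
    (fun answer i =>
      if solInner (PySem.List.pyGetD schedules i 0) (PySem.List.pyGetD timelogs i []) startday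
      then answer + 1 else answer) 0

-- ===== PORT B =====
def convertTimeB (n : Int) : Int :=
  let h := PySem.Int.floordiv n 100
  let m := PySem.Int.mod n 100
  h * 60 + m

-- Source B's `for j in range(longest): …` loop building the weekday positions
def weekIdx (day : Int) (j : Nat) : Nat → List Nat
  | 0 => []
  | k + 1 =>
    let rest := weekIdx (if day = 7 then 1 else day + 1) (j + 1) k
    if day = 6 ∨ day = 7 then rest else j :: rest

-- Source B's final `sum(1 for … if all(…))` over the zipped pairs
def countPassing (pairs : List (Int × List Int)) (weekdays : List Nat) : Int :=
  pairs.foldl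
    (fun acc p =>
      if (weekdays.filter (fun j => decide (j < p.2.length))).all
           (fun j => decide (convertTimeB (p.2.getD j 0) ≤ convertTimeB p.1 + 10))
      then acc + 1 else acc) 0

def solution_alt (schedules : List Int) (timelogs : List (List Int)) (startday : Int) : Int :=
  countPassing (schedules.zip timelogs)
    (weekIdx startday 0
      ((schedules.zip timelogs).foldl (fun acc p => max acc p.2.length) 0))

-- ===== PRECONDITION & SPEC =====
-- Pre_ excludes exactly the inputs where A raises IndexError: timelogs shorter than schedules.
def Pre_solution (schedules : List Int) (timelogs : List (List Int)) (startday : Int) : Prop :=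
  schedules.length ≤ timelogs.length
instance (schedules : List Int) (timelogs : List (List Int)) (startday : Int) : Decidable (Pre_solution schedules timelogs startday) := by unfold Pre_solution; infer_instance

def pvWitness_solution : List Int × List (List Int) × Int := ([900], [[900, 910]], 1)

def Spec_solution (schedules : List Int) (timelogs : List (List Int)) (startday : Int) (out : Int) : Prop := out = solution_alt schedules timelogs startday
instance (schedules : List Int) (timelogs : List (List Int)) (startday : Int) (out : Int) : Decidable (Spec_solution schedules timelogs startday out) := by unfold Spec_solution; infer_instance

-- ===== CLAIM (what is proved, stated in full; the proofs are below) =====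
def Claim_equal_solution : Prop := ∀ (schedules : List Int) (timelogs : List (List Int)) (startday : Int), Dom_solution schedules timelogs startday → Pre_solution schedules timelogs startday → Spec_solution schedules timelogs startday (solution schedules timelogs startday)


-- ===== LEMMAS AND PROOFS =====

theorem convertTimeB_eq (n : Int) : convertTimeB n = convertTime n := rfl

-- every element of weekIdx day j k lies in [j, j+k)
theorem weekIdx_bounds (k : Nat) (day : Int) (j : Nat) :
    ∀ x ∈ weekIdx day j k, j ≤ x ∧ x < j + k := by
  induction k generalizing day j with
  | zero => simp [weekIdx]
  | succ k ih =>
    intro x hx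
    simp only [weekIdx] at hx
    split at hx
    · have := ih _ _ _ hx; omega
    · rcases List.mem_cons.mp hx with h | h
      · omega
      · have := ih _ _ _ h; omega

-- filtering weekIdx by a length cutoff truncates the fuel
theorem weekIdx_filter (k : Nat) (day : Int) (j L : Nat) :
    (weekIdx day j k).filter (fun x => decide (x < j + L)) = weekIdx day j (min k L) := by
  induction k generalizing day j L with
  | zero => simp [weekIdx]
  | succ k ih =>
    cases L with
    | zero =>
      simp only [Nat.min_zero, weekIdx]
      rw [List.filter_eq_nil_iff.mpr]
      intro x hx
      have := weekIdx_bounds (k + 1) day j x hx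
      simp only [decide_eq_true_eq]
      omega
    | succ L =>
      have hmin : min (k + 1) (L + 1) = min k L + 1 := by omega
      rw [hmin]
      simp only [weekIdx]
      have harith : j + (L + 1) = (j + 1) + L := by omega
      split
      · rw [harith, ih]
      · rw [List.filter_cons_of_pos (by simp), harith, ih]

-- shifting the start index shifts every element
theorem weekIdx_shift (k : Nat) (day : Int) (j : Nat) :
    weekIdx day (j + 1) k = (weekIdx day j k).map (· + 1) := by
  induction k generalizing day j with
  | zero => simp [weekIdx]
  | succ k ih =>
    simp only [weekIdx]
    split
    · exact ih _ _
    · simp [ih]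

-- B's per-employee check over the weekday positions equals A's inner loop
theorem all_weekIdx_eq_solInner (sched : Int) (logs : List Int) (s : Int) :
    (weekIdx s 0 logs.length).all
      (fun j => decide (convertTimeB (logs.getD j 0) ≤ convertTimeB sched + 10))
    = solInner sched logs s := by
  induction logs generalizing s with
  | nil => simp [weekIdx, solInner]
  | cons t rest ih =>
    have hshift := weekIdx_shift rest.length (if s = 7 then 1 else s + 1) 0
    simp only [List.length_cons]
    show (weekIdx s 0 (rest.length + 1)).all _ = _
    simp only [weekIdx, solInner]
    by_cases hw : s = 6 ∨ s = 7
    · have hday : (if s = 7 then 1 else s + 1) = (if s + 1 = 8 then 1 else s + 1) := by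
        rcases hw with h | h <;> simp [h]
      rw [if_pos hw, if_pos hw, hshift, List.all_map, hday, ← ih]
      simp only [Function.comp_def, List.getD_cons_succ]
    · have hs7 : ¬ s = 7 := fun h => hw (Or.inr h)
      rw [if_neg hw, if_neg hw, hshift, if_neg hs7]
      simp only [List.all_cons, List.all_map]
      rw [← ih (s + 1)]
      have htail : ((weekIdx (s + 1) 0 rest.length).all
          ((fun j => decide (convertTimeB ((t :: rest).getD j 0) ≤ convertTimeB sched + 10)) ∘ (· + 1)))
          = (weekIdx (s + 1) 0 rest.length).all
          (fun j => decide (convertTimeB (rest.getD j 0) ≤ convertTimeB sched + 10)) := by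
        simp only [Function.comp_def, List.getD_cons_succ]
      rw [htail]
      by_cases hc : convertTime t > convertTime sched + 10
      · rw [if_pos hc]
        have h0 : (decide (convertTimeB ((t :: rest).getD 0 0) ≤ convertTimeB sched + 10)) = false := by
          simp [convertTimeB_eq]; omega
        rw [h0, Bool.false_and]
      · rw [if_neg hc]
        have h0 : (decide (convertTimeB ((t :: rest).getD 0 0) ≤ convertTimeB sched + 10)) = true := by
          simp [convertTimeB_eq]; omega
        rw [h0, Bool.true_and]

-- the indexed fold over range(n) equals the fold over zip when timelogs is long enough
theorem fold_range_eq_fold_zip (f : Int → List Int → Bool) :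
    ∀ (scs : List Int) (tls : List (List Int)) (acc : Int), scs.length ≤ tls.length →
    (List.range scs.length).foldl
      (fun a k => if f (scs.getD k 0) (tls.getD k []) then a + 1 else a) acc
    = (scs.zip tls).foldl (fun a p => if f p.1 p.2 then a + 1 else a) acc := by
  intro scs
  induction scs with
  | nil => simp
  | cons sc scs ih =>
    intro tls acc hlen
    cases tls with
    | nil => simp at hlen
    | cons tl tls =>
      simp only [List.length_cons, List.range_succ_eq_map, List.foldl_cons, List.foldl_map,
        List.getD_cons_zero, List.zip_cons_cons]
      rw [← ih tls _ (by simpa using hlen)]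
      simp

theorem solution_eq_alt (schedules : List Int) (timelogs : List (List Int)) (startday : Int)
    (hpre : schedules.length ≤ timelogs.length) :
    solution schedules timelogs startday = solution_alt schedules timelogs startday := by
  unfold solution solution_alt countPassing
  rw [show ((schedules.length : Int)) = ((schedules.length : Nat) : Int) from rfl,
    PySem.List.pyRange_zero_natCast, List.foldl_map]
  simp only [PySem.List.pyGetD_natCast]
  rw [fold_range_eq_fold_zip (fun sc lg => solInner sc lg startday) schedules timelogs 0 hpre]
  apply PySem.List.foldl_congr_mem
  intro acc p hp
  have hle : p.2.length ≤ (schedules.zip timelogs).foldl (fun acc p => max acc p.2.length) 0 := by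
    have h := (PySem.List.le_foldl_max ((schedules.zip timelogs).map (fun p => p.2.length)) 0).2
    rw [List.foldl_map] at h
    exact h _ (List.mem_map_of_mem hp)
  have hfil := weekIdx_filter
    ((schedules.zip timelogs).foldl (fun acc p => max acc p.2.length) 0) startday 0 p.2.length
  simp only [Nat.zero_add] at hfil
  rw [hfil, Nat.min_eq_right hle, all_weekIdx_eq_solInner]

-- ===== VERDICT (by name: the statement is the Claim_ definition above) =====
theorem solution_spec : Claim_equal_solution := by
  intro schedules timelogs startday _ hpre
  unfold Spec_solution
  exact solution_eq_alt schedules timelogs startday hpre
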